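-- pv_equiv track=rewrite | github.com/bbbeton/AOC | aoc2023/day3/aoc5-6 v2.py | wypisz_liczby
-- ===== SOURCE A (Python) =====
-- def wypisz_liczby(line):
--     symbols_to_remove = '!@#$%^&*()_-+=[]><?/~\n`'
--     new_line = str(line)
--     for symbol in symbols_to_remove:
--         if symbol in line:
--             new_line = new_line.replace(symbol,'')
--     x = new_line.split(".")
--     liczby = list(filter(None, x))
--     return liczby
-- ===== SOURCE B (Python) =====
-- def wypisz_liczby(line):
--     symbols_to_remove = '!@#$%^&*()_-+=[]><?/~\n`'
--     result = []
--     token = ''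
--     for ch in str(line):
--         if ch in symbols_to_remove:
--             continue
--         if ch == '.':
--             if token:
--                 result.append(token)
--             token = ''
--         else:
--             token += ch
--     if token:
--         result.append(token)
--     return result
-- ===== Notes on version B (the rewrite author's own statement) =====
-- stated objective: simpler
-- what changed: Replaced the 23 sequential replace passes plus split plus empty-filter with a single left-to-right scan that skips symbols, flushes the current token at each dot separator, and appends non-empty tokens as it goes.
import Mathlib
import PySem

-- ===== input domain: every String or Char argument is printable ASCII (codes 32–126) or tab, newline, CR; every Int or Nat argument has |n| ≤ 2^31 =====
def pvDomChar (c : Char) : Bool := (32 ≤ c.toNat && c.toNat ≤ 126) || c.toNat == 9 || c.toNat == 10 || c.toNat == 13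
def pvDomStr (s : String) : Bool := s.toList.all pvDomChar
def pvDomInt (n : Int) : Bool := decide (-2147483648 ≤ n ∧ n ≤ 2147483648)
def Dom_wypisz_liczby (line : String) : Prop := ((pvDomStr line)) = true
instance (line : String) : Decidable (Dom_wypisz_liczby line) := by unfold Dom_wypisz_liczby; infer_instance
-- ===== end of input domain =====

-- B fuses A's 23 sequential replace passes, the '.'-split and the empty-filter into one left-to-right scan (objective: simpler).


-- ===== PORT A =====
def pvSymbolsA : String := "!@#$%^&*()_-+=[]><?/~\n`"

def wypisz_liczby (line : String) : List String :=
  -- new_line = str(line): on a string argument str() is the identity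
  let new_line : String := line
  let new_line := pvSymbolsA.toList.foldl
    (fun nl symbol =>
      if PySem.Str.isIn (String.ofList [symbol]) line then
        PySem.Str.replace nl (String.ofList [symbol]) ""
      else nl)
    new_line
  -- x = new_line.split("."); the separator "." is non-empty so split? is `some`
  let x := (PySem.Str.split? new_line ".").getD []
  -- liczby = list(filter(None, x)): keep the non-empty strings
  x.filter (fun s => s ≠ "")

-- ===== PORT B =====
def pvSymbolsB : List Char := "!@#$%^&*()_-+=[]><?/~\n`".toList

def wypisz_liczby_alt (line : String) : List String :=
  -- one scan over the characters of str(line); state = (result so far, current token)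
  let st := line.toList.foldl
    (fun (st : List String × List Char) ch =>
      if ch ∈ pvSymbolsB then st
      else if ch = '.' then
        ((if st.2 ≠ [] then st.1 ++ [String.ofList st.2] else st.1), ([] : List Char))
      else (st.1, st.2 ++ [ch]))
    ([], [])
  if st.2 ≠ [] then st.1 ++ [String.ofList st.2] else st.1

-- ===== PRECONDITION & SPEC =====
def Spec_wypisz_liczby (line : String) (out : List String) : Prop := out = wypisz_liczby_alt line
instance (line : String) (out : List String) : Decidable (Spec_wypisz_liczby line out) := by unfold Spec_wypisz_liczby; infer_instance

-- ===== CLAIM (what is proved, stated in full; the proofs are below) =====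
def Claim_equal_wypisz_liczby : Prop := ∀ (line : String), Dom_wypisz_liczby line → Spec_wypisz_liczby line (wypisz_liczby line)

-- ===== LEMMAS AND PROOFS =====

-- reference split on '.': pieces of a char list between dots (empties kept)
def pvMapFirst (f : List Char → List Char) : List (List Char) → List (List Char)
  | [] => []
  | h :: t => f h :: t

def pvSplitDot : List Char → List (List Char)
  | [] => [[]]
  | c :: t => if c = '.' then [] :: pvSplitDot t else pvMapFirst (fun h => c :: h) (pvSplitDot t)

theorem pvMapFirst_comp (f g : List Char → List Char) (l : List (List Char)) :
    pvMapFirst f (pvMapFirst g l) = pvMapFirst (fun h => f (g h)) l := by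
  cases l <;> simp [pvMapFirst]

theorem pvMapFirst_congr {f g : List Char → List Char} (h : ∀ x, f x = g x)
    (l : List (List Char)) : pvMapFirst f l = pvMapFirst g l := by
  cases l <;> simp [pvMapFirst, h]

theorem pvMapFirst_id (l : List (List Char)) : pvMapFirst (fun h => h) l = l := by
  cases l <;> simp [pvMapFirst]

theorem pvMapFirst_nil_append (l : List (List Char)) :
    pvMapFirst (fun h => ([] : List Char) ++ h) l = l := by
  rw [pvMapFirst_congr (fun x => List.nil_append x), pvMapFirst_id]

-- python's s.replace(c, '') for a single char = filtering that char out
theorem pvReplaceGo (c : Char) : ∀ (fuel : Nat) (l acc : List Char), l.length ≤ fuel →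
    PySem.Chars.replace.go [c] [] fuel l acc = acc.reverse ++ l.filter (· ≠ c) := by
  intro fuel
  induction fuel with
  | zero => intro l acc h
            have : l = [] := List.eq_nil_of_length_eq_zero (Nat.le_zero.mp h)
            subst this; simp [PySem.Chars.replace.go]
  | succ n ih =>
      intro l acc h
      cases l with
      | nil => simp [PySem.Chars.replace.go]
      | cons c' t =>
        rw [PySem.Chars.replace.go]
        simp only [List.isPrefixOf, Bool.and_true, List.length_cons] at *
        by_cases hc : c = c'
        · subst hc
          simp only [beq_self_eq_true, if_pos, List.length_nil, List.reverse_nil, List.nil_append,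
            Nat.zero_add, List.drop_succ_cons, List.drop_zero]
          rw [ih t _ (by omega)]
          simp
        · have hb : (c == c') = false := by simp [hc]
          simp only [hb, Bool.false_eq_true, if_false]
          rw [ih t _ (by omega)]
          simp [Ne.symm hc]

theorem pvReplaceSingleton (c : Char) (s : List Char) :
    PySem.Chars.replace s [c] [] = s.filter (· ≠ c) := by
  rw [PySem.Chars.replace]
  simp only [List.isEmpty_cons, Bool.false_eq_true, if_false]
  rw [pvReplaceGo c s.length s [] le_rfl]
  simp

theorem pvIsInSingleton (c : Char) (t : List Char) :
    PySem.Chars.isIn [c] t = true ↔ c ∈ t := by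
  rw [PySem.Chars.isIn_iff_infix]
  constructor
  · intro h; exact h.sublist.subset (by simp)
  · intro h
    obtain ⟨l1, l2, rfl⟩ := List.append_of_mem h
    exact ⟨l1, l2, by simp⟩

-- A's replace loop over any symbol list = one filter (list level)
theorem pvCleanList (ss : List Char) : ∀ (s t : List Char), (∀ x ∈ s, x ∈ t) →
    ss.foldl (fun nl c => if PySem.Chars.isIn [c] t then PySem.Chars.replace nl [c] [] else nl) s
      = s.filter (fun c => !ss.contains c) := by
  induction ss with
  | nil => intro s t _; simp
  | cons c ss ih =>
    intro s t hsub
    have hstep : (if PySem.Chars.isIn [c] t then PySem.Chars.replace s [c] [] else s)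
        = s.filter (· ≠ c) := by
      by_cases h : PySem.Chars.isIn [c] t = true
      · simp [h, pvReplaceSingleton]
      · have hct : c ∉ t := fun hm => h ((pvIsInSingleton c t).mpr hm)
        have heq : s.filter (· ≠ c) = s := by
          apply List.filter_eq_self.mpr
          intro x hx
          simp only [decide_eq_true_eq]
          rintro rfl; exact hct (hsub x hx)
        simp only [h, if_false]
        simpa [decide_not] using heq.symm
    rw [List.foldl_cons, hstep, ih _ t (fun x hx => hsub x (List.mem_of_mem_filter hx))]
    rw [List.filter_filter]
    apply List.filter_congr
    intro x hx
    simp [eq_comm, Bool.and_comm]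

-- the same loop on the String side, moved to toList
theorem pvCleanStr (ss : List Char) : ∀ (nl line : String),
    (ss.foldl (fun nl symbol =>
        if PySem.Str.isIn (String.ofList [symbol]) line then
          PySem.Str.replace nl (String.ofList [symbol]) "" else nl) nl).toList
      = ss.foldl (fun s c => if PySem.Chars.isIn [c] line.toList then PySem.Chars.replace s [c] [] else s) nl.toList := by
  induction ss with
  | nil => intro nl line; rfl
  | cons c ss ih =>
    intro nl line
    rw [List.foldl_cons, List.foldl_cons, ih]
    congr 1
    by_cases h : PySem.Chars.isIn [c] line.toList = true
    · simp [PySem.Str.isIn, h, PySem.Str.toList_replace]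
    · simp [PySem.Str.isIn, h]

theorem pvSplitGo : ∀ (fuel : Nat) (l cur : List Char) (acc : List (List Char)), l.length ≤ fuel →
    PySem.Chars.splitOn.go ['.'] fuel l cur acc
      = acc.reverse ++ pvMapFirst (fun h => cur.reverse ++ h) (pvSplitDot l) := by
  intro fuel
  induction fuel with
  | zero => intro l cur acc h
            have : l = [] := List.eq_nil_of_length_eq_zero (Nat.le_zero.mp h)
            subst this; simp [PySem.Chars.splitOn.go, pvSplitDot, pvMapFirst]
  | succ n ih =>
      intro l cur acc h
      cases l with
      | nil => simp [PySem.Chars.splitOn.go, pvSplitDot, pvMapFirst]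
      | cons c t =>
        rw [PySem.Chars.splitOn.go]
        simp only [List.isPrefixOf, Bool.and_true, List.length_cons] at *
        by_cases hc : '.' = c
        · subst hc
          simp only [beq_self_eq_true, if_pos, List.length_cons, List.drop_succ_cons,
            List.length_nil, List.drop_zero]
          rw [ih t [] _ (by omega)]
          have hsd : pvSplitDot ('.' :: t) = [] :: pvSplitDot t := by simp [pvSplitDot]
          rw [hsd]
          cases pvSplitDot t <;> simp [pvMapFirst]
        · have hb : ('.' == c) = false := by simp [hc]
          simp only [hb, Bool.false_eq_true, if_false]
          rw [ih t (c :: cur) acc (by omega)]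
          congr 1
          simp only [pvSplitDot, Ne.symm hc, if_false, List.reverse_cons]
          rw [pvMapFirst_comp]
          apply pvMapFirst_congr
          intro x; simp

theorem pvSplitOnDot (s : List Char) :
    PySem.Chars.splitOn s ['.'] = pvSplitDot s := by
  rw [PySem.Chars.splitOn]
  rw [pvSplitGo (s.length + 1) s [] [] (by omega)]
  simp only [List.reverse_nil, List.nil_append, pvMapFirst_id]

theorem pvSplitSome (s : String) :
    PySem.Str.split? s "." = some ((PySem.Chars.splitOn s.toList ['.']).map String.ofList) := by
  have hb := PySem.Str.split?_map s "."
  cases hx : PySem.Str.split? s "." with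
  | none => rw [hx] at hb; simp [PySem.Chars.split?] at hb
  | some xs =>
    rw [hx] at hb
    simp only [Option.map_some, PySem.Chars.split?] at hb
    have : (".").toList = ['.'] := rfl
    rw [this] at hb
    have hxs : xs.map String.toList = PySem.Chars.splitOn s.toList ['.'] := by
      simpa using hb
    congr 1
    rw [← hxs]
    simp [List.map_map, Function.comp_def]

-- B's scan (symbols already removed), characterised by pvSplitDot
theorem pvScan : ∀ (l : List Char) (tokens : List String) (cur : List Char),
    (let st := l.foldl
        (fun (st : List String × List Char) ch =>
          if ch = '.' then
            ((if st.2 ≠ [] then st.1 ++ [String.ofList st.2] else st.1), ([] : List Char))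
          else (st.1, st.2 ++ [ch])) (tokens, cur);
      if st.2 ≠ [] then st.1 ++ [String.ofList st.2] else st.1)
      = tokens ++ ((pvMapFirst (fun h => cur ++ h) (pvSplitDot l)).filter (fun x => x ≠ [])).map String.ofList := by
  intro l
  induction l with
  | nil =>
    intro tokens cur
    simp only [List.foldl_nil, pvSplitDot, pvMapFirst, List.append_nil]
    by_cases h : cur = []
    · simp [h]
    · simp [h]
  | cons c t ih =>
    intro tokens cur
    by_cases hc : c = '.'
    · subst hc
      simp only [List.foldl_cons, if_pos rfl]
      simp only [if_pos trivial]
      rw [ih]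
      rw [pvMapFirst_nil_append]
      have h1 : pvMapFirst (fun h => cur ++ h) (pvSplitDot ('.' :: t))
          = (cur ++ []) :: pvSplitDot t := by
        simp [pvSplitDot, pvMapFirst]
      rw [h1]
      simp only [List.append_nil, List.filter_cons]
      by_cases h : cur = []
      · simp [h]
      · simp [h]
    · simp only [List.foldl_cons, if_neg hc]
      rw [ih]
      congr 1
      simp only [pvSplitDot, hc, if_false]
      rw [pvMapFirst_comp]
      congr 1
      apply congrArg (fun z => List.filter _ z)
      apply pvMapFirst_congr
      intro x; simp

-- ===== VERDICT (by name: the statement is the Claim_ definition above) =====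
theorem wypisz_liczby_spec : Claim_equal_wypisz_liczby := by
  intro line _
  unfold Spec_wypisz_liczby
  have hF : (pvSymbolsA.toList.foldl
      (fun nl symbol =>
        if PySem.Str.isIn (String.ofList [symbol]) line then
          PySem.Str.replace nl (String.ofList [symbol]) "" else nl) line).toList
      = line.toList.filter (fun c => !pvSymbolsB.contains c) := by
    rw [pvCleanStr, pvCleanList _ line.toList line.toList (fun x hx => hx)]
    have hsym : pvSymbolsA.toList = pvSymbolsB := rfl
    rw [hsym]
  have hA : wypisz_liczby line
      = ((pvSplitDot (line.toList.filter (fun c => !pvSymbolsB.contains c))).filter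
          (fun x => x ≠ [])).map String.ofList := by
    show ((PySem.Str.split? (pvSymbolsA.toList.foldl
        (fun nl symbol =>
          if PySem.Str.isIn (String.ofList [symbol]) line then
            PySem.Str.replace nl (String.ofList [symbol]) "" else nl) line) ".").getD []).filter
        (fun s => s ≠ "") = _
    rw [pvSplitSome, Option.getD_some, hF, pvSplitOnDot]
    rw [List.filter_map]
    congr 1
    apply List.filter_congr
    intro x _
    simp [Function.comp]
  have hB : wypisz_liczby_alt line
      = ((pvSplitDot (line.toList.filter (fun c => !pvSymbolsB.contains c))).filter
          (fun x => x ≠ [])).map String.ofList := by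
    show (if (line.toList.foldl
        (fun (st : List String × List Char) ch =>
          if ch ∈ pvSymbolsB then st
          else if ch = '.' then
            ((if st.2 ≠ [] then st.1 ++ [String.ofList st.2] else st.1), ([] : List Char))
          else (st.1, st.2 ++ [ch])) ([], [])).2 ≠ [] then (line.toList.foldl
        (fun (st : List String × List Char) ch =>
          if ch ∈ pvSymbolsB then st
          else if ch = '.' then
            ((if st.2 ≠ [] then st.1 ++ [String.ofList st.2] else st.1), ([] : List Char))
          else (st.1, st.2 ++ [ch])) ([], [])).1 ++ [String.ofList (line.toList.foldl
        (fun (st : List String × List Char) ch =>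
          if ch ∈ pvSymbolsB then st
          else if ch = '.' then
            ((if st.2 ≠ [] then st.1 ++ [String.ofList st.2] else st.1), ([] : List Char))
          else (st.1, st.2 ++ [ch])) ([], [])).2] else (line.toList.foldl
        (fun (st : List String × List Char) ch =>
          if ch ∈ pvSymbolsB then st
          else if ch = '.' then
            ((if st.2 ≠ [] then st.1 ++ [String.ofList st.2] else st.1), ([] : List Char))
          else (st.1, st.2 ++ [ch])) ([], [])).1) = _
    have hfun : (fun (st : List String × List Char) ch =>
        if ch ∈ pvSymbolsB then st
        else if ch = '.' then
          ((if st.2 ≠ [] then st.1 ++ [String.ofList st.2] else st.1), ([] : List Char))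
        else (st.1, st.2 ++ [ch]))
        = (fun (st : List String × List Char) ch =>
          if (!pvSymbolsB.contains ch) = true then
            (fun (st : List String × List Char) ch =>
              if ch = '.' then
                ((if st.2 ≠ [] then st.1 ++ [String.ofList st.2] else st.1), ([] : List Char))
              else (st.1, st.2 ++ [ch])) st ch
          else st) := by
      funext st ch
      by_cases h : ch ∈ pvSymbolsB <;> simp [h]
    rw [hfun, PySem.List.foldl_if_eq_foldl_filter]
    have h := pvScan (line.toList.filter (fun c => !pvSymbolsB.contains c)) [] []
    simpa [pvMapFirst_id] using h
  rw [hA, hB]
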